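-- pv_equiv track=rewrite | github.com/pedroivoal/Dessoft | Exercicios/09.String/24.Nomes com vogais.py | nomes_com_vogais
-- ===== SOURCE A (Python) =====
-- def nomes_com_vogais(nomes):
--
--     contador = [0, 0]
--     vogais = 'AEIOU'
--
--     for nome in nomes:
--
--         if nome[0] in vogais:
--             contador[0] += 1
--         else:
--             contador[1] += 1
--
--     return contador
-- ===== SOURCE B (Python) =====
-- def nomes_com_vogais(nomes):
--     firsts = [nome[0] for nome in nomes]
--     vogais = 0
--     for v in 'AEIOU':
--         vogais += firsts.count(v)
--     return [vogais, len(firsts) - vogais]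
-- ===== Notes on version B (the rewrite author's own statement) =====
-- stated objective: alternative
-- what changed: B first extracts the list of first letters, then iterates over the five vowels counting occurrences of each with list.count (vowel-major traversal instead of A's name-major pass with a membership test and two counters), deriving the consonant count by subtraction.
import Mathlib
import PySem

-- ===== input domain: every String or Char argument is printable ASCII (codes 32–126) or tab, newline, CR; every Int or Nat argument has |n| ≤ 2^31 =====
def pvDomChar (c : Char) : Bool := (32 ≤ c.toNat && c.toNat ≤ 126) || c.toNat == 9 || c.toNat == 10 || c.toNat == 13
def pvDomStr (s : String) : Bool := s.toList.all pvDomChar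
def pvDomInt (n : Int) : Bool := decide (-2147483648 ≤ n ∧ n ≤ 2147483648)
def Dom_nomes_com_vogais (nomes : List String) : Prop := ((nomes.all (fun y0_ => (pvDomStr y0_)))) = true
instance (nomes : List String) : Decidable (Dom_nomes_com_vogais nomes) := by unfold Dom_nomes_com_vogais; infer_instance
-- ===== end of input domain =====

-- B extracts the first letters once and then counts each of the five vowels with list.count (vowel-major traversal) instead of A's single name-major pass with an if/else on a membership test.

-- ===== PORT A =====
-- contador is the pair of the two cells of the list [0, 0]; returned as [c.1, c.2].
def nomes_com_vogais (nomes : List String) : List Int :=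
  let contador : Int × Int :=
    nomes.foldl (fun c nome =>
      match PySem.Str.pyGet? nome 0 with
      | some ch => if ['A','E','I','O','U'].contains ch then (c.1 + 1, c.2) else (c.1, c.2 + 1)
      | none => c)   -- Python raises IndexError here; excluded by Pre_
      (0, 0)
  [contador.1, contador.2]

-- ===== PORT B =====
-- firsts = [nome[0] for nome in nomes]; nome[0] raises on an empty string (excluded by Pre_), so each element is ported as Option Char.
def nomes_com_vogais_alt (nomes : List String) : List Int :=
  let firsts : List (Option Char) := nomes.map (fun nome => PySem.Str.pyGet? nome 0)
  let vogais : Int :=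
    ['A','E','I','O','U'].foldl (fun acc v => acc + (firsts.count (some v) : Int)) 0
  [vogais, (firsts.length : Int) - vogais]

-- ===== PRECONDITION & SPEC =====
-- Pre_ excludes lists containing an empty string, on which A (and B) raise IndexError at nome[0].
def Pre_nomes_com_vogais (nomes : List String) : Prop := ∀ n ∈ nomes, n ≠ ""
instance (nomes : List String) : Decidable (Pre_nomes_com_vogais nomes) := by unfold Pre_nomes_com_vogais; infer_instance
def pvWitness_nomes_com_vogais : List String := ["Ana", "Bob", "Eva"]
def Spec_nomes_com_vogais (nomes : List String) (out : List Int) : Prop := out = nomes_com_vogais_alt nomes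
instance (nomes : List String) (out : List Int) : Decidable (Spec_nomes_com_vogais nomes out) := by unfold Spec_nomes_com_vogais; infer_instance

-- ===== CLAIM =====
def Claim_equal_nomes_com_vogais : Prop := ∀ (nomes : List String), Dom_nomes_com_vogais nomes → Pre_nomes_com_vogais nomes → Spec_nomes_com_vogais nomes (nomes_com_vogais nomes)

-- ===== LEMMAS AND PROOFS =====
-- the per-name test (first character is an uppercase vowel), phrased on the Option first char
def pvVowelOpt (o : Option Char) : Bool :=
  match o with
  | some ch => ['A','E','I','O','U'].contains ch
  | none => false

lemma pvFold_inv (nomes : List String) (c0 c1 : Int)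
    (h : ∀ n ∈ nomes, n ≠ "") :
    nomes.foldl (fun c nome =>
      match PySem.Str.pyGet? nome 0 with
      | some ch => if ['A','E','I','O','U'].contains ch then (c.1 + 1, c.2) else (c.1, c.2 + 1)
      | none => c) (c0, c1)
    = (c0 + (nomes.countP (fun n => pvVowelOpt (PySem.Str.pyGet? n 0)) : Int),
       c1 + ((nomes.length : Int) - (nomes.countP (fun n => pvVowelOpt (PySem.Str.pyGet? n 0)) : Int))) := by
  induction nomes generalizing c0 c1 with
  | nil => simp
  | cons n ns ih =>
    have hn : n ≠ "" := h n (List.mem_cons_self ..)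
    have hget : ∃ ch, PySem.Str.pyGet? n 0 = some ch := by
      cases hc : n.toList with
      | nil => exact absurd (by simpa [String.toList_eq_nil_iff] using hc) hn
      | cons a l => exact ⟨a, by simp [hc]⟩
    obtain ⟨ch, hch⟩ := hget
    have hrest := ih (h := fun m hm => h m (List.mem_cons_of_mem _ hm))
    rw [List.foldl_cons, hch]
    cases hb : (['A','E','I','O','U'].contains ch) with
    | true =>
      simp only [hb, if_true, hrest, List.countP_cons, pvVowelOpt, hch, Prod.mk.injEq]
      constructor <;> (push_cast [List.length_cons]; ring)
    | false =>
      simp only [hb, hrest, List.countP_cons, pvVowelOpt, hch, Prod.mk.injEq]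
      constructor <;> (push_cast [List.length_cons]; ring)

-- the five per-vowel counts sum to the count of vowel-headed entries (the vowels are pairwise distinct)
lemma pvSumCounts (l : List (Option Char)) :
    ((l.count (some 'A') : Int) + (l.count (some 'E') : Int) + (l.count (some 'I') : Int)
      + (l.count (some 'O') : Int) + (l.count (some 'U') : Int))
    = (l.countP pvVowelOpt : Int) := by
  induction l with
  | nil => simp
  | cons o t ih =>
    cases o with
    | none =>
      simpa [List.count_cons, List.countP_cons, pvVowelOpt] using ih
    | some ch =>
      simp only [List.count_cons, List.countP_cons, pvVowelOpt]
      by_cases hA : ch = 'A' <;> by_cases hE : ch = 'E' <;> by_cases hI : ch = 'I'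
        <;> by_cases hO : ch = 'O' <;> by_cases hU : ch = 'U'
        <;> simp_all <;> omega

-- ===== VERDICT =====
theorem nomes_com_vogais_spec : Claim_equal_nomes_com_vogais := by
  intro nomes _ hpre
  unfold Spec_nomes_com_vogais nomes_com_vogais nomes_com_vogais_alt
  rw [pvFold_inv nomes 0 0 hpre]
  simp only [List.foldl, List.length_map, zero_add]
  rw [pvSumCounts, List.countP_map]
  rfl
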